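-- pv_equiv track=rewrite | github.com/stonedge77/OhAI- | ohai.py | and_nouns
-- ===== SOURCE A (Python) =====
-- def and_nouns(sets: list[set]) -> set:
--     """AND across multiple noun sets — intersection."""
--     if not sets:
--         return set()
--     result = sets[0].copy()
--     for s in sets[1:]:
--         result &= s
--     # If intersection empty, return union of all (new field — nothing cancelled yet)
--     if not result:
--         result = set()
--         for s in sets:
--             result |= s
--     return result
-- ===== SOURCE B (Python) =====
-- def and_nouns(sets: list[set]) -> set:
--     """AND across multiple noun sets — intersection (union of all if empty),
--     computed with one counting pass instead of repeated pairwise set ops."""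
--     if not sets:
--         return set()
--     n = len(sets)
--     counts = {}
--     for s in sets:
--         for e in s:
--             counts[e] = counts.get(e, 0) + 1
--     result = {e for e, c in counts.items() if c == n}
--     if not result:
--         result = set(counts.keys())
--     return result
-- ===== Notes on version B (the rewrite author's own statement) =====
-- stated objective: alternative
-- what changed: Replaces A's repeated pairwise set intersections (and a second union loop on fallback) by a single counting pass building a frequency dict, reading the intersection off as the elements counted len(sets) times and the union as the dict's keys.
import Mathlib
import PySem

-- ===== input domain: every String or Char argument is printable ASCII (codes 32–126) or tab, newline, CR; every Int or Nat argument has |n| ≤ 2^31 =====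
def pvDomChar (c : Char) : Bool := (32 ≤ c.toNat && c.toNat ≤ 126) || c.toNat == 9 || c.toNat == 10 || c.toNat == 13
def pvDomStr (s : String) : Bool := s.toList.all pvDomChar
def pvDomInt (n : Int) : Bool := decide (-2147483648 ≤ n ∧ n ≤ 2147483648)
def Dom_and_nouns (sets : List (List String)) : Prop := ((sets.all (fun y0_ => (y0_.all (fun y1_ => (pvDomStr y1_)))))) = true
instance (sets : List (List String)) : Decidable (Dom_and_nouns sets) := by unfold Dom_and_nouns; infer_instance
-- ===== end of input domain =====

-- B replaces A's repeated pairwise set intersections / union loops by one counting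
-- pass over all sets (a frequency dict), then filters; alternative algorithm, same cost.


-- ===== PORT A =====
def and_nouns (sets : List (List String)) : List String :=
  match sets with
  | [] => PySem.Set.empty
  | s0 :: rest =>
    -- result = sets[0].copy(); for s in sets[1:]: result &= s
    let result : PySem.Set String :=
      rest.foldl (fun r s => PySem.Set.inter r s) (PySem.Set.ofList s0)
    -- if not result: result = set(); for s in sets: result |= s
    if result.isEmpty then
      (s0 :: rest).foldl (fun r s => PySem.Set.union r s) PySem.Set.empty
    else result

-- ===== PORT B =====
def and_nouns_alt (sets : List (List String)) : List String :=
  if sets.isEmpty then PySem.Set.empty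
  else
    let n : Int := sets.length
    -- counts[e] = counts.get(e, 0) + 1, iterating every (distinct-element) set
    let counts : PySem.Dict String Int :=
      sets.foldl (fun d s =>
        (PySem.Set.ofList s).foldl (fun d e => d.insert e (d.getD e 0 + 1)) d)
        PySem.Dict.empty
    -- {e for e, c in counts.items() if c == n}
    let result : PySem.Set String :=
      PySem.Set.ofList ((counts.items.filter (fun p => p.2 == n)).map (fun p => p.1))
    -- if not result: result = set(counts.keys())
    if result.isEmpty then PySem.Set.ofList counts.keys else result

-- ===== PRECONDITION & SPEC =====
def Spec_and_nouns (sets : List (List String)) (out : List String) : Prop := out = and_nouns_alt sets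
instance (sets : List (List String)) (out : List String) : Decidable (Spec_and_nouns sets out) := by unfold Spec_and_nouns; infer_instance

-- ===== CLAIM (what is proved, stated in full; the proofs are below) =====
def Claim_equal_and_nouns : Prop := ∀ (sets : List (List String)), Dom_and_nouns sets → Spec_and_nouns sets (and_nouns sets)

-- ===== LEMMAS AND PROOFS =====

-- all distinct elements of all the sets, in scan order (B's counting pass reads this list)
def pvFlat (sets : List (List String)) : List String :=
  sets.flatMap (fun s => PySem.Set.ofList s)

lemma pv_inter_eq_filter (r t : PySem.Set String) :
    PySem.Set.inter r t = r.filter (fun x => PySem.Set.contains t x) := rfl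

-- A's intersection loop filters sets[0] by membership in every later set
lemma pv_interfold (rest : List (List String)) (r0 : PySem.Set String) :
    rest.foldl (fun r s => PySem.Set.inter r s) r0
      = r0.filter (fun e => rest.all (fun s => PySem.Set.contains s e)) := by
  induction rest generalizing r0 with
  | nil => simp
  | cons s rest ih =>
      rw [List.foldl_cons, ih, pv_inter_eq_filter, List.filter_filter]
      apply List.filter_congr
      intro e _
      simp [List.all_cons, Bool.and_comm]

-- B's counting loop is Counter(pvFlat sets)
lemma pv_counts_eq (sets : List (List String)) :
    sets.foldl (fun d s =>
        (PySem.Set.ofList s).foldl (fun d e => d.insert e (d.getD e 0 + 1)) d)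
        PySem.Dict.empty
      = PySem.Dict.counter (pvFlat sets) := by
  rw [← PySem.Dict.foldl_insert_getD_add_one_eq_counter, pvFlat, List.foldl_flatMap]

lemma pv_count_flat (sets : List (List String)) (e : String) :
    (pvFlat sets).count e = sets.countP (fun s => PySem.Set.contains s e) := by
  induction sets with
  | nil => simp [pvFlat]
  | cons s rest ih =>
      have hsplit : pvFlat (s :: rest) = PySem.Set.ofList s ++ pvFlat rest := by
        simp [pvFlat]
      rw [hsplit, List.count_append, ih, List.countP_cons]
      by_cases h : e ∈ s
      · have hc : PySem.Set.contains s e = true := (PySem.Set.contains_iff s e).2 h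
        rw [List.count_eq_one_of_mem (PySem.Set.nodup_ofList s) ((PySem.Set.mem_ofList s e).2 h), hc]
        simp [Nat.add_comm]
      · have hc : PySem.Set.contains s e = false :=
          Bool.eq_false_iff.mpr (fun hcc => h ((PySem.Set.contains_iff s e).1 hcc))
        rw [List.count_eq_zero_of_not_mem (fun hm => h ((PySem.Set.mem_ofList s e).1 hm)), hc]
        simp

lemma pv_update_ofList (r : PySem.Set String) (s : List String) :
    PySem.Set.update r (PySem.Set.ofList s) = PySem.Set.update r s := by
  simp [PySem.Set.update_eq_append_filter]

-- A's union loop accumulates exactly the distinct elements in scan order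
lemma pv_unionfold (sets : List (List String)) (r : PySem.Set String) :
    sets.foldl (fun r s => PySem.Set.union r s) r = PySem.Set.update r (pvFlat sets) := by
  induction sets generalizing r with
  | nil => simp [pvFlat, PySem.Set.update_nil]
  | cons s rest ih =>
      have hsplit : pvFlat (s :: rest) = PySem.Set.ofList s ++ pvFlat rest := by
        simp [pvFlat]
      rw [List.foldl_cons, ih, hsplit, PySem.Set.update_append, pv_update_ofList,
        PySem.Set.union_eq_update]

-- B's filtered items, as a filter of pvFlat's distinct elements
lemma pv_items_filter (xs : List String) (n : Int) :
    ((PySem.Dict.counter (κ := String) xs).items.filter (fun p => p.2 == n)).map (fun p => p.1)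
      = (PySem.Set.ofList xs).filter (fun k => ((xs.count k : Int) == n)) := by
  rw [PySem.Dict.items_counter, List.filter_map, List.map_map]
  simp [Function.comp_def]

-- the main equality of the two intersection results
lemma pv_candidate_eq (s0 : List String) (rest : List (List String)) :
    (PySem.Set.ofList (pvFlat (s0 :: rest))).filter
        (fun k => (((pvFlat (s0 :: rest)).count k : Int) == ((s0 :: rest).length : Int)))
      = (PySem.Set.ofList s0).filter (fun e => rest.all (fun s => PySem.Set.contains s e)) := by
  have hq : ∀ k : String, (((pvFlat (s0 :: rest)).count k : Int) == ((s0 :: rest).length : Int))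
      = ((s0 :: rest).all (fun s => PySem.Set.contains s k)) := by
    intro k
    rw [pv_count_flat]
    have hle : (s0 :: rest).countP (fun s => PySem.Set.contains s k) ≤ (s0 :: rest).length :=
      List.countP_le_length
    rcases h : (s0 :: rest).all (fun s => PySem.Set.contains s k) with _ | _
    · have hne : (s0 :: rest).countP (fun s => PySem.Set.contains s k) ≠ (s0 :: rest).length := by
        intro heq
        obtain ⟨x, hx, hpx⟩ := List.all_eq_false.1 h
        exact hpx (List.countP_eq_length.1 heq x hx)
      rw [beq_eq_false_iff_ne]
      exact_mod_cast hne
    · have heq : (s0 :: rest).countP (fun s => PySem.Set.contains s k) = (s0 :: rest).length :=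
        List.countP_eq_length.2 (List.all_eq_true.1 h)
      rw [beq_iff_eq]
      exact_mod_cast heq
  -- rewrite the filter predicate
  rw [List.filter_congr (fun k _ => hq k)]
  -- split pvFlat (s0::rest) = ofList s0 ++ pvFlat rest
  have hsplit : PySem.Set.ofList (pvFlat (s0 :: rest))
      = PySem.Set.update (PySem.Set.ofList s0) (pvFlat rest) := by
    rw [pvFlat, List.flatMap_cons, ← pvFlat, PySem.Set.ofList_append, PySem.Set.ofList_ofList]
  rw [hsplit, PySem.Set.update_eq_append_filter, List.filter_append, List.filter_filter]
  have hnil : (PySem.Set.ofList (pvFlat rest)).filter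
      (fun a => (s0 :: rest).all (fun s => PySem.Set.contains s a)
        && !(PySem.Set.ofList s0).contains a) = [] := by
    apply List.filter_eq_nil_iff.2
    intro a _
    by_cases hm : a ∈ s0
    · simp [hm, PySem.Set.mem_ofList]
    · simp [List.all_cons, hm]
  rw [hnil, List.append_nil]
  apply List.filter_congr
  intro e he
  have hm : e ∈ s0 := (PySem.Set.mem_ofList s0 e).1 he
  simp [List.all_cons, hm]

-- ===== VERDICT (by name: the statement is the Claim_ definition above) =====
theorem and_nouns_spec : Claim_equal_and_nouns := by
  intro sets _
  unfold Spec_and_nouns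
  match sets with
  | [] => rfl
  | s0 :: rest =>
      rw [and_nouns, and_nouns_alt]
      simp only [List.isEmpty_cons, if_neg Bool.false_ne_true, pv_counts_eq, pv_interfold,
        pv_items_filter, pv_unionfold, PySem.Dict.keys_counter, PySem.Set.ofList_ofList]
      rw [pv_candidate_eq]
      rw [show PySem.Set.empty.update (pvFlat (s0 :: rest)) = PySem.Set.ofList (pvFlat (s0 :: rest))
        from by rw [PySem.Set.empty_eq, PySem.Set.update_nil_left]]
      have hof : PySem.Set.ofList ((PySem.Set.ofList s0).filter
          (fun e => rest.all (fun s => PySem.Set.contains s e)))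
          = (PySem.Set.ofList s0).filter (fun e => rest.all (fun s => PySem.Set.contains s e)) :=
        PySem.Set.ofList_eq_self_of_nodup _ ((PySem.Set.nodup_ofList s0).filter _)
      rw [hof]
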